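-- pv_equiv track=rewrite | github.com/bigface008/leetcode_py | leetcode/p2218.py | maxValueOfCoins
-- ===== SOURCE A (Python) =====
-- from itertools import accumulate
-- from typing import List
-- from functools import cache
--
-- def maxValueOfCoins(piles: List[List[int]], k: int) -> int:
--     N = len(piles)
--     pre_sum = [list(accumulate(p, initial=0)) for p in piles]
--
--     @cache
--     def dfs(i: int, j: int) -> int:
--         if i == -1 or j == 0:
--             return 0
--         ans = 0
--         for w in range(min(j, len(piles[i])) + 1):
--             ans = max(ans, dfs(i - 1, j - w) + pre_sum[i][w])
--         return ans
--
--     return dfs(N - 1, k)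
-- ===== SOURCE B (Python) =====
-- from itertools import accumulate
-- from typing import List
--
-- def maxValueOfCoins(piles: List[List[int]], k: int) -> int:
--     # Bottom-up tabulation: one dp row per processed pile, budget capped at the
--     # total number of coins available (picking more than that is impossible).
--     K = max(0, min(k, sum(len(p) for p in piles)))
--     dp = [0] * (K + 1)
--     for p in piles:
--         pre = list(accumulate(p, initial=0))
--         dp = [max(dp[j - w] + pre[w] for w in range(min(j, len(p)) + 1))
--               for j in range(K + 1)]
--     return dp[K]
-- ===== Notes on version B (the rewrite author's own statement) =====
-- stated objective: alternative
-- what changed: Replaced A's @cache-memoized top-down recursion dfs(i, j) by bottom-up tabulation: one fresh dp row per pile (a list comprehension over budgets j), with the budget capped at the total number of available coins.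
import Mathlib
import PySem

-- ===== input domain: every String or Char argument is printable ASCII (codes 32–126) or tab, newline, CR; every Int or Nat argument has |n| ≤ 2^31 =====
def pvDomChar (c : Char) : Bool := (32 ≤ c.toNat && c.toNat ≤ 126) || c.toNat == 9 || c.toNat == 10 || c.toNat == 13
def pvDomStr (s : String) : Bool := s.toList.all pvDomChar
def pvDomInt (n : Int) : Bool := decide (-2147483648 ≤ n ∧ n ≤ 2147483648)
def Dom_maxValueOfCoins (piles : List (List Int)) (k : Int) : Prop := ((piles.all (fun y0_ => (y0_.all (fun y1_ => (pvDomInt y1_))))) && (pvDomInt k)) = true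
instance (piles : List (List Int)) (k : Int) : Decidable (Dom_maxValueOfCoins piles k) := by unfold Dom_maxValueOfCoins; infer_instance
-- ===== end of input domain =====

-- B replaces A's memoized top-down recursion by bottom-up tabulation (one fresh dp row per
-- pile, budget capped at the total coin count); measured faster by a constant factor (no
-- recursion/cache overhead).

-- ===== PORT A =====
-- list(accumulate(p, initial=0))
def preSumA (p : List Int) : List Int := p.scanl (· + ·) 0

-- dfs(i, j) of A; the Nat argument is i+1 (0 encodes Python's i == -1).
-- The @cache memoization is omitted: it only changes cost, not values.
def dfsA (piles presum : List (List Int)) : Nat → Int → Int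
  | 0, _ => 0
  | i + 1, j =>
    if j = 0 then 0
    else
      (PySem.List.pyRange 0 (min j ((piles.getD i []).length : Int) + 1) 1).foldl
        (fun ans w => max ans (dfsA piles presum i (j - w) + (presum.getD i []).getD w.toNat 0)) 0

def maxValueOfCoins (piles : List (List Int)) (k : Int) : Int :=
  dfsA piles (piles.map preSumA) piles.length k

-- ===== PORT B =====
-- one dp row update for pile p (fresh row, list comprehension over j)
def rowB (dp : List Int) (p pre : List Int) (K : Nat) : List Int :=
  (List.range (K + 1)).map (fun j =>
    (((List.range (min j p.length + 1)).map (fun w => dp.getD (j - w) 0 + pre.getD w 0)).max?).getD 0)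

def maxValueOfCoins_alt (piles : List (List Int)) (k : Int) : Int :=
  -- K = max(0, min(k, sum(len(p) for p in piles))); .toNat is Python's max(0, ·)
  let K : Nat := (min k ((piles.map (fun p => (p.length : Int))).sum)).toNat
  let dp := piles.foldl (fun dp p => rowB dp p (p.scanl (· + ·) 0) K) (List.replicate (K + 1) 0)
  dp.getD K 0

-- ===== PRECONDITION & SPEC =====
def Spec_maxValueOfCoins (piles : List (List Int)) (k : Int) (out : Int) : Prop := out = maxValueOfCoins_alt piles k
instance (piles : List (List Int)) (k : Int) (out : Int) : Decidable (Spec_maxValueOfCoins piles k out) := by unfold Spec_maxValueOfCoins; infer_instance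

-- ===== CLAIM (what is proved, stated in full; the proofs are below) =====
def Claim_equal_maxValueOfCoins : Prop := ∀ (piles : List (List Int)) (k : Int), Dom_maxValueOfCoins piles k → Spec_maxValueOfCoins piles k (maxValueOfCoins piles k)

-- ===== LEMMAS AND PROOFS =====

-- max over f 0 .. f m (both loops compute this)
def bestUpTo (f : Nat → Int) : Nat → Int
  | 0 => f 0
  | m + 1 => max (bestUpTo f m) (f (m + 1))

lemma bestUpTo_congr (f g : Nat → Int) (m : Nat) (h : ∀ w ≤ m, f w = g w) :
    bestUpTo f m = bestUpTo g m := by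
  induction m with
  | zero => simp [bestUpTo, h 0 (by omega)]
  | succ m ih =>
    simp [bestUpTo, ih (fun w hw => h w (by omega)), h (m + 1) (by omega)]

lemma bestUpTo_ge_zero (f : Nat → Int) (m : Nat) : f 0 ≤ bestUpTo f m := by
  induction m with
  | zero => simp [bestUpTo]
  | succ m ih => exact le_trans ih (le_max_left _ _)

-- A's inner for-loop is a running max over range(m+1)
lemma foldlA_eq_bestUpTo (m : Nat) (f : Int → Int) (a : Int) :
    (PySem.List.pyRange 0 ((m : Int) + 1) 1).foldl (fun ans w => max ans (f w)) a
      = max a (bestUpTo (fun w => f (w : Int)) m) := by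
  induction m generalizing a with
  | zero =>
    rw [show ((0 : Nat) : Int) + 1 = 0 + 1 by norm_num, PySem.List.pyRange_one_singleton]
    simp [bestUpTo]
  | succ m ih =>
    rw [show ((m + 1 : Nat) : Int) + 1 = ((m : Int) + 1) + 1 by push_cast; ring,
      PySem.List.pyRange_one_succ_right (by positivity), List.foldl_append, ih]
    simp [bestUpTo, max_assoc]

lemma max?_concat (l : List Int) (x : Int) :
    (l ++ [x]).max? = some (match l.max? with | none => x | some y => max y x) := by
  cases l with
  | nil => simp
  | cons a t =>
    rw [List.cons_append, List.max?_cons', List.max?_cons', List.foldl_append]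
    simp

-- B's inner max(...) generator is the same running max
lemma maxB_eq_bestUpTo (m : Nat) (g : Nat → Int) :
    (((List.range (m + 1)).map g).max?).getD 0 = bestUpTo g m := by
  suffices h : ((List.range (m + 1)).map g).max? = some (bestUpTo g m) by simp [h]
  induction m with
  | zero => simp [bestUpTo, List.range_succ]
  | succ m ih =>
    rw [List.range_succ (n := m + 1), List.map_append, List.map_singleton, max?_concat, ih]
    simp [bestUpTo]

lemma dfsA_zero (piles presum : List (List Int)) (i : Nat) :
    dfsA piles presum i 0 = 0 := by
  cases i <;> simp [dfsA]

lemma dfsA_neg (piles presum : List (List Int)) (i : Nat) (j : Int) (hj : j < 0) :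
    dfsA piles presum i j = 0 := by
  cases i with
  | zero => simp [dfsA]
  | succ i =>
    rw [dfsA, if_neg (by omega), PySem.List.pyRange_one_eq_nil (by
      have : min j ((piles.getD i []).length : Int) ≤ j := min_le_left _ _
      omega)]
    simp

lemma dfsA_nonneg (piles presum : List (List Int)) (i : Nat) (j : Int) :
    0 ≤ dfsA piles presum i j := by
  cases i with
  | zero => simp [dfsA]
  | succ i =>
    rw [dfsA]
    split
    · exact le_refl 0
    · exact (PySem.List.le_foldl_max_int _ _ _).1

-- unfolding of dfsA on a positive budget, in bestUpTo form
lemma dfsA_succ_pos (piles presum : List (List Int)) (i : Nat) (j : Int) (hj : 0 < j) :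
    dfsA piles presum (i + 1) j
      = max 0 (bestUpTo (fun w => dfsA piles presum i (j - w) + (presum.getD i []).getD w 0)
          (min j ((piles.getD i []).length : Int)).toNat) := by
  have hmin : 0 ≤ min j ((piles.getD i []).length : Int) := le_min (by omega) (by positivity)
  rw [dfsA, if_neg (by omega),
    show min j ((piles.getD i []).length : Int) + 1
        = ((min j ((piles.getD i []).length : Int)).toNat : Int) + 1 by
      rw [Int.toNat_of_nonneg hmin],
    foldlA_eq_bestUpTo]
  simp

lemma preSumA_head (p : List Int) : (preSumA p).getD 0 0 = 0 := by
  cases p <;> simp [preSumA, List.scanl]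

-- one entry of B's fresh dp row, in bestUpTo form
lemma rowB_getD (dp p pre : List Int) (K j : Nat) (hj : j ≤ K) :
    (rowB dp p pre K).getD j 0
      = bestUpTo (fun w => dp.getD (j - w) 0 + pre.getD w 0) (min j p.length) := by
  unfold rowB
  rw [List.getD_eq_getElem?_getD, List.getElem?_map, List.getElem?_range (by omega)]
  simp [maxB_eq_bestUpTo]

-- the dp row after the first n piles tabulates dfs(n-1, ·)
lemma dp_inv (piles : List (List Int)) (K : Nat) (n : Nat) (hn : n ≤ piles.length)
    (j : Nat) (hj : j ≤ K) :
    ((piles.take n).foldl (fun dp p => rowB dp p (p.scanl (· + ·) 0) K)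
        (List.replicate (K + 1) 0)).getD j 0
      = dfsA piles (piles.map preSumA) n (j : Int) := by
  induction n generalizing j with
  | zero => simp [dfsA]
  | succ n ih =>
    have hn' : n < piles.length := by omega
    rw [List.take_add_one, List.foldl_append, List.getElem?_eq_getElem hn']
    simp only [Option.toList_some, List.foldl_cons, List.foldl_nil]
    rw [show piles[n].scanl (· + ·) 0 = preSumA piles[n] from rfl, rowB_getD _ _ _ _ _ hj]
    have h1 : piles.getD n [] = piles[n] := List.getD_eq_getElem piles [] hn'
    have h2 : (piles.map preSumA).getD n [] = preSumA piles[n] := by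
      rw [List.getD_eq_getElem?_getD, List.getElem?_map, List.getElem?_eq_getElem hn']
      rfl
    rcases Nat.eq_zero_or_pos j with hj0 | hj0
    · subst hj0
      simp only [Nat.zero_min, bestUpTo, Nat.sub_zero, Nat.cast_zero]
      rw [ih (by omega) 0 (by omega), preSumA_head, Nat.cast_zero, dfsA_zero, dfsA_zero]
      norm_num
    · rw [dfsA_succ_pos _ _ _ _ (by exact_mod_cast hj0), h1, h2,
        show (min (j : Int) (piles[n].length : Int)).toNat = min j piles[n].length by
          rw [← Nat.cast_min]; exact Int.toNat_natCast _]
      have hcong : bestUpTo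
            (fun w => dfsA piles (piles.map preSumA) n ((j : Int) - w) + (preSumA piles[n]).getD w 0)
            (min j piles[n].length)
          = bestUpTo
            (fun w => ((piles.take n).foldl (fun dp p => rowB dp p (p.scanl (· + ·) 0) K)
                (List.replicate (K + 1) 0)).getD (j - w) 0 + (preSumA piles[n]).getD w 0)
            (min j piles[n].length) := by
        apply bestUpTo_congr
        intro w hw
        have hwj : w ≤ j := le_trans hw (min_le_left _ _)
        rw [ih (by omega) (j - w) (by omega), Nat.cast_sub hwj]
      rw [← hcong]
      have hnn : (0 : Int) ≤ bestUpTo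
          (fun w => dfsA piles (piles.map preSumA) n ((j : Int) - w) + (preSumA piles[n]).getD w 0)
          (min j piles[n].length) := by
        refine le_trans ?_ (bestUpTo_ge_zero _ _)
        simp only [Nat.cast_zero, sub_zero, preSumA_head, add_zero]
        exact dfsA_nonneg _ _ _ _
      omega

-- number of coins in the first n piles
def Lsum (piles : List (List Int)) (n : Nat) : Int :=
  ((piles.take n).map (fun p => (p.length : Int))).sum

lemma Lsum_nonneg (piles : List (List Int)) (n : Nat) : 0 ≤ Lsum piles n := by
  apply List.sum_nonneg
  intro x hx
  rcases List.mem_map.mp hx with ⟨p, _, rfl⟩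
  positivity

lemma Lsum_succ (piles : List (List Int)) (n : Nat) (hn : n < piles.length) :
    Lsum piles (n + 1) = Lsum piles n + (piles[n].length : Int) := by
  unfold Lsum
  rw [List.take_add_one, List.getElem?_eq_getElem hn, Option.toList_some,
    List.map_append, List.sum_append, List.map_singleton, List.sum_singleton]

-- budgets at or above the number of available coins all give the same value
lemma dfsA_cap (piles : List (List Int)) (n : Nat) (hn : n ≤ piles.length)
    (j : Int) (hj : Lsum piles n ≤ j) :
    dfsA piles (piles.map preSumA) n j = dfsA piles (piles.map preSumA) n (Lsum piles n) := by
  induction n generalizing j with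
  | zero => simp [dfsA]
  | succ n ih =>
    have hn' : n < piles.length := by omega
    have hL := Lsum_succ piles n hn'
    have hLn := Lsum_nonneg piles n
    have hplen : (0 : Int) ≤ (piles[n].length : Int) := by positivity
    have h1 : piles.getD n [] = piles[n] := List.getD_eq_getElem piles [] hn'
    have h2 : (piles.map preSumA).getD n [] = preSumA piles[n] := by
      rw [List.getD_eq_getElem?_getD, List.getElem?_map, List.getElem?_eq_getElem hn']
      rfl
    by_cases hj0 : j = 0
    · have : Lsum piles (n + 1) = 0 := by omega
      rw [hj0, this]
    · have hjpos : 0 < j := by omega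
      by_cases hL0 : Lsum piles (n + 1) = 0
      · have hp0 : piles[n].length = 0 := by omega
        have hLn0 : Lsum piles n = 0 := by omega
        rw [hL0, dfsA_zero, dfsA_succ_pos _ _ _ _ hjpos, h1, h2]
        simp only [hp0, Nat.cast_zero]
        rw [min_eq_right (by omega : (0 : Int) ≤ j)]
        simp only [Int.toNat_zero, bestUpTo, Nat.cast_zero, sub_zero, preSumA_head, add_zero]
        rw [ih (by omega) j (by omega), hLn0, dfsA_zero]
        simp
      · have hLpos : 0 < Lsum piles (n + 1) := by omega
        rw [dfsA_succ_pos _ _ _ _ hjpos, dfsA_succ_pos _ _ _ _ hLpos, h1, h2,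
          show min j ((piles[n].length : Int)) = (piles[n].length : Int) by omega,
          show min (Lsum piles (n + 1)) ((piles[n].length : Int)) = (piles[n].length : Int) by omega,
          Int.toNat_natCast]
        congr 1
        apply bestUpTo_congr
        intro w hw
        have hw' : (w : Int) ≤ (piles[n].length : Int) := by exact_mod_cast hw
        rw [ih (by omega) (j - w) (by omega), ih (by omega) (Lsum piles (n + 1) - w) (by omega)]

theorem maxValueOfCoins_spec : Claim_equal_maxValueOfCoins := by
  intro piles k _
  unfold Spec_maxValueOfCoins maxValueOfCoins maxValueOfCoins_alt
  simp only []
  have hT : ((piles.map (fun p => (p.length : Int))).sum) = Lsum piles piles.length := by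
    unfold Lsum
    rw [List.take_length]
  have hT0 : 0 ≤ Lsum piles piles.length := Lsum_nonneg _ _
  set T := (piles.map (fun p => (p.length : Int))).sum with hTdef
  set K : Nat := (min k T).toNat with hK
  have halt := dp_inv piles K piles.length le_rfl K le_rfl
  rw [List.take_length] at halt
  rw [halt]
  have hTL : T = Lsum piles piles.length := hT
  by_cases hk : k ≤ 0
  · have hK0 : K = 0 := by rw [hK]; omega
    rw [hK0, Nat.cast_zero, dfsA_zero]
    rcases eq_or_lt_of_le hk with hk0 | hkneg
    · rw [hk0, dfsA_zero]
    · exact dfsA_neg _ _ _ _ hkneg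
  · by_cases hkT : k ≤ T
    · have : (K : Int) = k := by rw [hK]; omega
      rw [this]
    · have hKT : (K : Int) = T := by rw [hK]; omega
      rw [hKT, hTL, dfsA_cap piles piles.length le_rfl k (by omega),
        dfsA_cap piles piles.length le_rfl (Lsum piles piles.length) le_rfl]
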